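/- GENERATED by farm/mkstatement.py from design/units.tsv (unit `start_decoder.9b`) and the assertions of Vorbis/Spec/StartDecoder9.lean — do not edit.
   THE STATEMENT of the proof unit `start_decoder.9b`: segment 9b of `start_decoder` (10 instructions; entries 0x114199;
   exits 0x113b22,0x1141f7; ranges 0x114199-0x1141ab + 0x1141bf-0x1141cc)
   takes each of its entry assertions to one of its exit assertions (`Vorbis.Spec.StartDecoder.Seg9b`), given the contracts of its callees.
   What the names mean: Vorbis/Spec/Basic.lean (the shared hypotheses), Vorbis/Spec/StartDecoder9.lean (the assertions). The theorem to prove: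
   `theorem start_decoder_9b_ok : Vorbis.Spec.start_decoder_9b.Statement`. -/
import Vorbis.Spec.Leaves
import Vorbis.Spec.Reader
import Vorbis.Spec.StartDecoder9
namespace Vorbis.Spec.start_decoder_9b
open X86 X86.User Asan

/-- The statement of unit `start_decoder.9b`. -/
def Statement : Prop :=
  ∀ (Lay : Layout) (_hLay : Lay.hi = 0x1000000) (μ : Microarch) (_hμ : UserX.MicroOK μ) (u₀ : State)
    (_hcode : HasCodeNat Lay u₀ Vorbis.L.start_decoder.entry Vorbis.Code.code_start_decoder.nat Vorbis.L.start_decoder.size)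
    (_h_get8_packet : ∀ (others : List Obj) (frames : List (Nat × FrameLayout)) (Blk : Block → Prop) (len : Nat), Calls Lay μ Vorbis.WayInv (Vorbis.conv u₀) Vorbis.L.get8_packet.entry (Vorbis.Spec.get8_packet.spec others frames Blk len))
    (_h_error : ∀ (others : List Obj) (frames : List (Nat × FrameLayout)), Calls Lay μ Vorbis.WayInv (Vorbis.conv u₀) Vorbis.L.error.entry (Vorbis.Spec.error.spec others frames)),
    Vorbis.Spec.StartDecoder.Seg9b Lay μ u₀

end Vorbis.Spec.start_decoder_9b
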